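-- pv_equiv track=rewrite | github.com/romankurnovskii/leetcode-apps | solutions/3710/01.py | maxPartitionFactor
-- ===== SOURCE A (Python) =====
-- from typing import List
--
-- def maxPartitionFactor(nums: List[int]) -> int:
--     n = len(nums)
--     res = 1
--
--     for i in range(1, n):
--         left_sum = sum(nums[:i])
--         right_sum = sum(nums[i:])
--
--         if right_sum != 0:
--             factor = left_sum // right_sum if right_sum > 0 else 0
--             res = max(res, factor)
--
--     return res
-- ===== SOURCE B (Python) =====
-- def maxPartitionFactor(nums):
--     total = sum(nums)
--     left = 0
--     res = 1
--     for x in nums[:-1]: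
--         left += x
--         right = total - left
--         if right != 0:
--             res = max(res, left // right if right > 0 else 0)
--     return res
-- ===== Notes on version B (the rewrite author's own statement) =====
-- stated objective: faster
-- what changed: replaced the per-split slice-and-sum (two O(n) sums per split point) by a single pass keeping a running prefix sum against the precomputed total
import Mathlib
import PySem

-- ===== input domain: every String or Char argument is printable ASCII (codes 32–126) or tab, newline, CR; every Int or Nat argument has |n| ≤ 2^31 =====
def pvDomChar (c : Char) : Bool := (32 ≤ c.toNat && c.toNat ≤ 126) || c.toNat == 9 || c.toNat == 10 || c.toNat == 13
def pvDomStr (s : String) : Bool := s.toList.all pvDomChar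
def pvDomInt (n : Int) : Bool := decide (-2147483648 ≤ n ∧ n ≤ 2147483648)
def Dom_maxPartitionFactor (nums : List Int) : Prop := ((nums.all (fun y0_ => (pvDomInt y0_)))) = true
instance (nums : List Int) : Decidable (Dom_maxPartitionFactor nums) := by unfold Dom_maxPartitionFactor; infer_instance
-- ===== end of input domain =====

-- B replaces A's per-split slice-and-sum (two O(n) sums per split) by one pass with a
-- running prefix sum against the precomputed total: objective 'faster' (asymptotic).

-- ===== PORT A =====
def maxPartitionFactor (nums : List Int) : Int :=
  let n : Int := nums.length
  (PySem.List.pyRange 1 n 1).foldl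
    (fun res i =>
      let leftSum := (PySem.List.slice nums none (some i)).sum
      let rightSum := (PySem.List.slice nums (some i) none).sum
      if rightSum ≠ 0 then
        let factor := if rightSum > 0 then PySem.Int.floordiv leftSum rightSum else 0
        max res factor
      else res) 1

-- ===== PORT B =====
def maxPartitionFactor_alt (nums : List Int) : Int :=
  let total := nums.sum
  ((PySem.List.slice nums none (some (-1))).foldl
    (fun (st : Int × Int) x =>
      let left := st.1 + x
      let right := total - left
      if right ≠ 0 then
        (left, max st.2 (if right > 0 then PySem.Int.floordiv left right else 0))
      else (left, st.2)) (0, 1)).2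

-- ===== PRECONDITION & SPEC =====
def Spec_maxPartitionFactor (nums : List Int) (out : Int) : Prop := out = maxPartitionFactor_alt nums
instance (nums : List Int) (out : Int) : Decidable (Spec_maxPartitionFactor nums out) := by unfold Spec_maxPartitionFactor; infer_instance

-- ===== CLAIM (what is proved, stated in full; the proofs are below) =====
def Claim_equal_maxPartitionFactor : Prop := ∀ (nums : List Int), Dom_maxPartitionFactor nums → Spec_maxPartitionFactor nums (maxPartitionFactor nums)

-- ===== LEMMAS AND PROOFS =====

-- the first component of B's fold state is the running prefix sum
theorem pv_fold_fst (g : Int → Int → Int) (xs : List Int) (a b : Int) :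
    (xs.foldl (fun st x => (st.1 + x, g (st.1 + x) st.2)) (a, b)).1 = a + xs.sum := by
  induction xs generalizing a b with
  | nil => simp
  | cons x xs ih => simp [List.foldl_cons, ih]; ring

-- index fold over prefix sums = element fold with a running sum
theorem pv_key (g : Int → Int → Int) (xs : List Int) (init : Int) :
    (List.range xs.length).foldl (fun r k => g ((xs.take (k + 1)).sum) r) init
      = (xs.foldl (fun st x => (st.1 + x, g (st.1 + x) st.2)) ((0 : Int), init)).2 := by
  induction xs using List.reverseRecOn with
  | nil => simp
  | append_singleton ys y ih =>
    have hcongr : (List.range ys.length).foldl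
        (fun r k => g (((ys ++ [y]).take (k + 1)).sum) r) init
        = (List.range ys.length).foldl (fun r k => g ((ys.take (k + 1)).sum) r) init := by
      apply List.foldl_ext
      intro a k hk
      have : k + 1 ≤ ys.length := by
        have := List.mem_range.mp hk; omega
      rw [List.take_append_of_le_length this]
    rw [List.length_append, List.length_cons, List.length_nil,
        List.range_succ, List.foldl_append, List.foldl_append]
    simp only [List.foldl_cons, List.foldl_nil]
    rw [hcongr, ih]
    have hfst := pv_fold_fst g ys 0 init
    rw [List.take_of_length_le (by simp)]
    simp [hfst]

-- sum of a drop, in terms of the total and the prefix sum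
theorem pv_sum_drop (xs : List Int) (m : Nat) :
    (xs.drop m).sum = xs.sum - (xs.take m).sum := by
  have h := congrArg List.sum (List.take_append_drop m xs)
  rw [List.sum_append] at h
  omega

-- ===== VERDICT (by name: the statement is the Claim_ definition above) =====
theorem maxPartitionFactor_spec : Claim_equal_maxPartitionFactor := by
  intro nums _
  unfold Spec_maxPartitionFactor maxPartitionFactor maxPartitionFactor_alt
  set total := nums.sum with htotal
  set g : Int → Int → Int := fun l r =>
    if total - l ≠ 0 then max r (if total - l > 0 then PySem.Int.floordiv l (total - l) else 0)
    else r with hg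
  -- A side: turn the pyRange fold into an index fold over prefix sums of dropLast
  have hA : (PySem.List.pyRange 1 (nums.length : Int) 1).foldl
      (fun res i =>
        let leftSum := (PySem.List.slice nums none (some i)).sum
        let rightSum := (PySem.List.slice nums (some i) none).sum
        if rightSum ≠ 0 then
          let factor := if rightSum > 0 then PySem.Int.floordiv leftSum rightSum else 0
          max res factor
        else res) 1
      = (List.range nums.dropLast.length).foldl
          (fun r k => g ((nums.dropLast.take (k + 1)).sum) r) 1 := by
    rw [PySem.List.pyRange_one, List.foldl_map]
    have hlen : (((nums.length : Int)) - 1).toNat = nums.dropLast.length := by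
      rw [List.length_dropLast]; omega
    rw [hlen]
    apply List.foldl_ext
    intro a k hk
    have hk' : k + 1 ≤ nums.dropLast.length := by
      have := List.mem_range.mp hk; omega
    have hcast : (1 : Int) + (k : Int) = ((k + 1 : Nat) : Int) := by push_cast; ring
    have htake : (PySem.List.slice nums none (some ((1 : Int) + k))) = nums.take (k + 1) := by
      rw [hcast, PySem.List.slice_to_natCast]
    have hdrop : (PySem.List.slice nums (some ((1 : Int) + k)) none) = nums.drop (k + 1) := by
      rw [hcast, PySem.List.slice_from_natCast]
    have htake' : nums.take (k + 1) = nums.dropLast.take (k + 1) := by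
      rw [List.dropLast_eq_take, List.take_take]
      congr 1
      rw [List.length_dropLast] at hk'
      omega
    simp only [htake, hdrop, pv_sum_drop, htake', hg, ← htotal]
  -- B side: the slice is dropLast and the body matches the running-sum fold
  have hB : (PySem.List.slice nums none (some (-1))) = nums.dropLast :=
    PySem.List.slice_to_neg_one nums
  rw [hA, hB, pv_key g nums.dropLast 1]
  congr 1
  apply List.foldl_ext
  intro st x _
  simp only [hg]
  split_ifs <;> rfl
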